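-- pv_equiv track=rewrite | github.com/orwithout/hugo_babel | tools/make_udc_tree_skos.py | ensure_parent
-- ===== SOURCE A (Python) =====
-- def ensure_parent(code, codes):
--     """递归寻找最近存在的父级代码；若无则返回首位数字"""
--     if '.' in code:
--         parent = code.rsplit('.', 1)[0]
--     elif len(code) > 1:
--         parent = code[:-1]
--     else:
--         return None
--     return parent if parent in codes else ensure_parent(parent, codes)
-- ===== SOURCE B (Python) =====
-- def ensure_parent(code, codes):
--     dots = [i for i, ch in enumerate(code) if ch == '.']
--     head_len = dots[0] if dots else len(code)
--     chain = [code[:i] for i in reversed(dots)] + [code[:j] for j in reversed(range(1, head_len))]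
--     for p in chain:
--         if p in codes:
--             return p
--     return None
-- ===== Notes on version B (the rewrite author's own statement) =====
-- stated objective: alternative
-- what changed: A recursively strips one ancestor step at a time (rsplit at the last dot, else drop the last char) re-testing membership at each level; B instead builds the whole ancestor chain in closed form from the dot positions (dot-prefixes in descending order, then character prefixes of the first segment) and returns the first chain element found in codes by a single linear scan.
import Mathlib
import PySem

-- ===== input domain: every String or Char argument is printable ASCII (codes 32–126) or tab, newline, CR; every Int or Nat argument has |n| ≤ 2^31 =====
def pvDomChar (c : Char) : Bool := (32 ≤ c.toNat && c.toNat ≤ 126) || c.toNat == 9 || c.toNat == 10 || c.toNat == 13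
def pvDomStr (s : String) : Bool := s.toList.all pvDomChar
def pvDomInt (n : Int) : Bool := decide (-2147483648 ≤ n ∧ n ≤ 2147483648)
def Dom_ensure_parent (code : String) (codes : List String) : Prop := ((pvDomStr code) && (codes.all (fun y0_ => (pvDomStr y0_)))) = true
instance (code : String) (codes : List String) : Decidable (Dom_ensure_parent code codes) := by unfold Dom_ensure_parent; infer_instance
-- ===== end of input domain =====

-- B replaces A's step-by-step recursion up the ancestor chain by a closed-form
-- construction of the whole chain (dot positions + character prefixes) followed by
-- one linear scan for the first member of `codes` (objective: alternative decomposition).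

-- ===== PORT A =====
-- hand port of `code.rsplit('.', 1)[0]` (everything before the LAST '.'); exact
-- whenever '.' occurs in cs, which is the only case A evaluates it.
def pvRsplitDotHead (cs : List Char) : List Char :=
  ((cs.reverse.dropWhile (fun c => c ≠ '.')).tail).reverse

def ensure_parent (code : String) (codes : List String) : Option String :=
  if PySem.Str.isIn "." code then
    -- parent = code.rsplit('.', 1)[0]
    let parent := String.ofList (pvRsplitDotHead code.toList)
    if parent ∈ codes then some parent else ensure_parent parent codes
  else if 1 < PySem.Str.len code then
    -- parent = code[:-1]
    let parent := PySem.Str.slice code none (some (-1))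
    if parent ∈ codes then some parent else ensure_parent parent codes
  else none
termination_by code.toList.length
decreasing_by
  · -- parent strictly shorter: the last '.' is dropped
    simp only [String.toList_ofList, pvRsplitDotHead, List.length_reverse, List.length_tail]
    have hac : ('.' : Char) ∈ code.toList := by
      have h1 := (PySem.Str.isIn_iff_infix (sub := ".") (s := code)).mp (by assumption)
      exact h1.subset (by simp)
    have hne : code.toList.reverse.dropWhile (fun c => c ≠ '.') ≠ [] := by
      intro hnil
      have := List.dropWhile_eq_nil_iff.mp hnil '.' (by simpa using hac)
      simp at this
    have h2 : (code.toList.reverse.dropWhile (fun c => c ≠ '.')).length ≤ code.toList.length := by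
      calc (code.toList.reverse.dropWhile (fun c => c ≠ '.')).length
          ≤ code.toList.reverse.length := List.length_dropWhile_le _ _
        _ = code.toList.length := List.length_reverse
    have h3 : 0 < (code.toList.reverse.dropWhile (fun c => c ≠ '.')).length :=
      List.length_pos_iff.mpr hne
    omega
  · -- parent = code[:-1] strictly shorter
    simp only [PySem.Str.slice_to_neg_one, List.length_dropLast]
    have : 1 < code.toList.length := by simpa [PySem.Str.len_eq] using (by assumption : 1 < PySem.Str.len code)
    omega

-- ===== PORT B =====
-- transliteration of Source B; the Python loop indices are the Nats 0 ≤ i < len(code), so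
-- enumerate(code) is ported as zipIdx, code[:i] as List.take i, and
-- reversed(range(1, head_len)) as (List.range' 1 (head_len - 1)).reverse — all exact here.
def ensure_parent_alt (code : String) (codes : List String) : Option String :=
  let cs := code.toList
  -- dots = [i for i, ch in enumerate(code) if ch == '.']
  let dots := ((cs.zipIdx).filter (fun p => p.1 == '.')).map (·.2)
  -- head_len = dots[0] if dots else len(code)
  let headLen := dots.headD cs.length
  -- chain = [code[:i] for i in reversed(dots)] + [code[:j] for j in reversed(range(1, head_len))]
  let chain := dots.reverse.map (fun i => String.ofList (cs.take i))
      ++ ((List.range' 1 (headLen - 1)).reverse.map (fun j => String.ofList (cs.take j)))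
  -- for p in chain: if p in codes: return p
  chain.find? (fun p => codes.contains p)

-- ===== PRECONDITION & SPEC =====
def Spec_ensure_parent (code : String) (codes : List String) (out : Option String) : Prop := out = ensure_parent_alt code codes
instance (code : String) (codes : List String) (out : Option String) : Decidable (Spec_ensure_parent code codes out) := by unfold Spec_ensure_parent; infer_instance

-- ===== CLAIM (what is proved, stated in full; the proofs are below) =====
def Claim_equal_ensure_parent : Prop := ∀ (code : String) (codes : List String), Dom_ensure_parent code codes → Spec_ensure_parent code codes (ensure_parent code codes)

-- ===== LEMMAS AND PROOFS =====

-- the ancestor chain of B, on the char-list side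
def pvChain (cs : List Char) : List String :=
  let dots := ((cs.zipIdx).filter (fun p => p.1 == '.')).map (·.2)
  let headLen := dots.headD cs.length
  dots.reverse.map (fun i => String.ofList (cs.take i))
      ++ ((List.range' 1 (headLen - 1)).reverse.map (fun j => String.ofList (cs.take j)))

theorem pvAlt_eq_find (code : String) (codes : List String) :
    ensure_parent_alt code codes = (pvChain code.toList).find? (fun p => codes.contains p) := rfl

-- indexed dot positions, generalized over the zipIdx offset
def pvDotsAux (cs : List Char) (n : Nat) : List Nat :=
  ((cs.zipIdx n).filter (fun p => p.1 == '.')).map (·.2)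

theorem pvChain_def (cs : List Char) :
    pvChain cs = (pvDotsAux cs 0).reverse.map (fun i => String.ofList (cs.take i))
      ++ ((List.range' 1 ((pvDotsAux cs 0).headD cs.length - 1)).reverse.map
            (fun j => String.ofList (cs.take j))) := rfl

theorem pvDotsAux_cons (c : Char) (cs : List Char) (n : Nat) :
    pvDotsAux (c :: cs) n = (if c = '.' then [n] else []) ++ pvDotsAux cs (n + 1) := by
  by_cases h : c = '.' <;> simp [pvDotsAux, h]

theorem pvDotsAux_append (l m : List Char) (n : Nat) :
    pvDotsAux (l ++ m) n = pvDotsAux l n ++ pvDotsAux m (n + l.length) := by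
  induction l generalizing n with
  | nil => simp [pvDotsAux]
  | cons c l ih =>
      simp only [List.cons_append, pvDotsAux_cons, ih (n + 1), List.length_cons]
      rw [show n + 1 + l.length = n + (l.length + 1) from by omega]
      by_cases h : c = '.' <;> simp [h]

theorem pvDotsAux_no_dot (r : List Char) (n : Nat) (h : ('.' : Char) ∉ r) :
    pvDotsAux r n = [] := by
  induction r generalizing n with
  | nil => rfl
  | cons c r ih =>
      have hc : c ≠ '.' := by rintro rfl; exact h (List.mem_cons_self)
      rw [pvDotsAux_cons]
      simp [hc, ih (n + 1) (fun hm => h (List.mem_cons_of_mem _ hm))]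

theorem pvMem_dotsAux (cs : List Char) (n i : Nat) (h : i ∈ pvDotsAux cs n) :
    n ≤ i ∧ i < n + cs.length := by
  induction cs generalizing n with
  | nil => simp [pvDotsAux] at h
  | cons c cs ih =>
      rw [pvDotsAux_cons] at h
      rcases List.mem_append.mp h with h | h
      · by_cases hc : c = '.'
        · simp [hc] at h
          simp only [List.length_cons]
          omega
        · simp [hc] at h
      · have := ih (n + 1) h
        simp only [List.length_cons]
        omega

-- first-occurrence decomposition along takeWhile/dropWhile
theorem pvFirstDot (l : List Char) (h : ('.' : Char) ∈ l) :
    l = l.takeWhile (fun c => c ≠ '.') ++ '.' :: (l.dropWhile (fun c => c ≠ '.')).tail ∧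
      ('.' : Char) ∉ l.takeWhile (fun c => c ≠ '.') := by
  induction l with
  | nil => simp at h
  | cons c l ih =>
      by_cases hc : c = '.'
      · subst hc; simp [List.takeWhile, List.dropWhile]
      · have hm : ('.' : Char) ∈ l := by
          rcases List.mem_cons.mp h with h | h
          · exact absurd h.symm hc
          · exact h
        obtain ⟨h1, h2⟩ := ih hm
        refine ⟨?_, ?_⟩
        · simp only [List.takeWhile, List.dropWhile, hc, decide_false, decide_not]
          simpa [hc] using congrArg (c :: ·) h1
        · simp only [List.takeWhile]
          simp only [ne_eq, decide_not] at h2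
          simp [hc, h2]
          exact fun he => hc he.symm

-- last-'.' decomposition of a string containing '.'
theorem pvSplitLastDot (cs : List Char) (h : ('.' : Char) ∈ cs) :
    cs = pvRsplitDotHead cs ++ '.' :: (cs.reverse.takeWhile (fun c => c ≠ '.')).reverse ∧
      ('.' : Char) ∉ (cs.reverse.takeWhile (fun c => c ≠ '.')).reverse := by
  obtain ⟨h1, h2⟩ := pvFirstDot cs.reverse (by simpa using h)
  refine ⟨?_, by simpa using h2⟩
  have := congrArg List.reverse h1
  simpa [pvRsplitDotHead, List.reverse_append] using this

theorem pvHeadD_append_singleton {α : Type} (l : List α) (a x : α) :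
    (l ++ [a]).headD x = l.headD a := by cases l <;> simp

-- peel, dot case: the chain of L ++ '.' :: R (no dot in R) starts with L
theorem pvChain_dot (L R : List Char) (hnr : ('.' : Char) ∉ R) :
    pvChain (L ++ '.' :: R) = String.ofList L :: pvChain L := by
  have hd : pvDotsAux (L ++ '.' :: R) 0 = pvDotsAux L 0 ++ [L.length] := by
    rw [pvDotsAux_append, pvDotsAux_cons, pvDotsAux_no_dot R _ hnr]
    simp
  have hmem : ∀ i ∈ pvDotsAux L 0, i < L.length := fun i hi => by
    have := pvMem_dotsAux L 0 i hi; omega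
  have hhl : (pvDotsAux L 0).headD L.length ≤ L.length := by
    cases hh : pvDotsAux L 0 with
    | nil => simp
    | cons a t =>
        simp only [List.headD_cons]
        exact le_of_lt (hmem a (by rw [hh]; exact List.mem_cons_self))
  rw [pvChain_def, pvChain_def, hd, pvHeadD_append_singleton, List.reverse_append]
  simp only [List.reverse_singleton, List.singleton_append, List.map_cons]
  rw [List.take_left, List.cons_append]
  congr 1
  congr 1
  · apply List.map_congr_left; intro i hi
    have : i < L.length := hmem i (List.mem_reverse.mp hi)
    rw [List.take_append_of_le_length (le_of_lt this)]
  · apply List.map_congr_left; intro j hj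
    have hj' := List.mem_range'_1.mp (List.mem_reverse.mp hj)
    have : j ≤ L.length := by omega
    rw [List.take_append_of_le_length this]

-- peel, dotless case with at least two characters: the chain starts with the dropLast
theorem pvChain_nodot_big (cs : List Char) (hnd : ('.' : Char) ∉ cs) (hlen : 1 < cs.length) :
    pvChain cs = String.ofList cs.dropLast :: pvChain cs.dropLast := by
  have hd0 : pvDotsAux cs 0 = [] := pvDotsAux_no_dot cs 0 hnd
  have hd1 : pvDotsAux cs.dropLast 0 =
      [] := pvDotsAux_no_dot _ 0 (fun h => hnd (List.dropLast_subset _ h))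
  rw [pvChain_def, pvChain_def, hd0, hd1]
  simp only [List.reverse_nil, List.map_nil, List.nil_append, List.headD_nil]
  rw [List.length_dropLast]
  obtain ⟨m, hm⟩ : ∃ m, cs.length = m + 2 := ⟨cs.length - 2, by omega⟩
  rw [hm, show m + 2 - 1 = m + 1 from rfl, show m + 1 - 1 = m from rfl, List.range'_concat,
    show 1 + 1 * m = m + 1 from by omega, List.reverse_append]
  simp only [List.reverse_singleton, List.singleton_append, List.map_cons]
  have ht : cs.take (m + 1) = cs.dropLast := by
    rw [List.dropLast_eq_take, hm]
    congr 1
  rw [ht]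
  congr 1
  apply List.map_congr_left; intro j hj
  have hj' := List.mem_range'_1.mp (List.mem_reverse.mp hj)
  rw [List.dropLast_eq_take, hm, show m + 2 - 1 = m + 1 from rfl, List.take_take,
    show min j (m + 1) = j from by omega]

-- peel, base case: a dotless code of length ≤ 1 has an empty chain
theorem pvChain_small (cs : List Char) (hnd : ('.' : Char) ∉ cs) (hlen : cs.length ≤ 1) :
    pvChain cs = [] := by
  rw [pvChain_def, pvDotsAux_no_dot cs 0 hnd]
  simp only [List.reverse_nil, List.map_nil, List.nil_append, List.headD_nil]
  rw [show cs.length - 1 = 0 from by omega]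
  simp

-- the peel law: B's chain satisfies A's recursion shape
theorem pvChain_peel (cs : List Char) :
    pvChain cs =
      if ('.' : Char) ∈ cs then
        String.ofList (pvRsplitDotHead cs) :: pvChain (pvRsplitDotHead cs)
      else if 1 < cs.length then
        String.ofList cs.dropLast :: pvChain cs.dropLast
      else [] := by
  split_ifs with h1 h2
  · obtain ⟨hsplit, hnr⟩ := pvSplitLastDot cs h1
    conv_lhs => rw [hsplit]
    exact pvChain_dot _ _ hnr
  · exact pvChain_nodot_big cs h1 h2
  · exact pvChain_small cs h1 (by omega)

theorem pvIsIn_dot (code : String) :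
    PySem.Str.isIn "." code = true ↔ ('.' : Char) ∈ code.toList := by
  rw [PySem.Str.isIn_iff_infix]
  constructor
  · intro h; exact h.subset (by simp)
  · intro h
    obtain ⟨s, t, hst⟩ := List.append_of_mem h
    exact ⟨s, t, by rw [hst]; simp⟩

-- main equivalence, by strong induction on the length of the code
theorem pvMain (n : Nat) : ∀ (code : String), code.toList.length ≤ n →
    ∀ (codes : List String), ensure_parent code codes = ensure_parent_alt code codes := by
  induction n with
  | zero =>
      intro code hlen codes
      have hcs : code.toList = [] := List.length_eq_zero_iff.mp (Nat.le_zero.mp hlen)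
      have h1 : ¬ (PySem.Str.isIn "." code = true) := by
        rw [pvIsIn_dot, hcs]; simp
      have h2 : ¬ (1 < PySem.Str.len code) := by
        rw [PySem.Str.len_eq, hcs]; norm_num
      rw [ensure_parent, pvAlt_eq_find, hcs, if_neg h1, if_neg h2]
      rfl
  | succ n ih =>
      intro code hlen codes
      rw [ensure_parent, pvAlt_eq_find, pvChain_peel]
      by_cases h1 : PySem.Str.isIn "." code = true
      · rw [if_pos h1, if_pos ((pvIsIn_dot code).mp h1)]
        show (if String.ofList (pvRsplitDotHead code.toList) ∈ codes then _ else _) = _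
        by_cases hp : String.ofList (pvRsplitDotHead code.toList) ∈ codes
        · rw [if_pos hp, List.find?_cons_of_pos (by simpa [List.contains_iff_mem] using hp)]
        · have hlt : (pvRsplitDotHead code.toList).length ≤ n := by
            obtain ⟨hsplit, _⟩ := pvSplitLastDot code.toList ((pvIsIn_dot code).mp h1)
            have hlen2 := congrArg List.length hsplit
            simp only [List.length_append, List.length_cons] at hlen2
            omega
          rw [if_neg hp, List.find?_cons_of_neg (by simp [hp]),
            ih _ (by simpa using hlt) codes, pvAlt_eq_find, String.toList_ofList]
      · rw [if_neg h1, if_neg (fun hm => h1 ((pvIsIn_dot code).mpr hm))]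
        by_cases h2 : 1 < PySem.Str.len code
        · have h2' : 1 < code.toList.length := by
            rw [PySem.Str.len_eq] at h2; exact_mod_cast h2
          rw [if_pos h2, if_pos h2']
          have hpar : PySem.Str.slice code none (some (-1)) =
              String.ofList code.toList.dropLast := by
            exact String.toList_inj.mp (by simp [PySem.List.slice_to_neg_one])
          show (if PySem.Str.slice code none (some (-1)) ∈ codes then _ else _) = _
          rw [hpar]
          by_cases hp : String.ofList code.toList.dropLast ∈ codes
          · rw [if_pos hp, List.find?_cons_of_pos (by simpa [List.contains_iff_mem] using hp)]
          · rw [if_neg hp, List.find?_cons_of_neg (by simp [hp]),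
              ih _ (by simp only [String.toList_ofList, List.length_dropLast]; omega) codes,
              pvAlt_eq_find, String.toList_ofList]
        · have h2' : ¬ 1 < code.toList.length := by
            intro hgt; apply h2; rw [PySem.Str.len_eq]; exact_mod_cast hgt
          rw [if_neg h2, if_neg h2']
          rfl

-- ===== VERDICT (by name: the statement is the Claim_ definition above) =====
theorem ensure_parent_spec : Claim_equal_ensure_parent := by
  intro code codes _
  unfold Spec_ensure_parent
  exact pvMain code.toList.length code le_rfl codes
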